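-- pv_equiv track=rewrite | github.com/tg929/model | decoder_runs/score_reranker_v1.py | hits_for_order
-- ===== SOURCE A (Python) =====
-- TOP_KS = (1, 3, 5, 10)
--
-- def hits_for_order(order: list[int], target_text: str, canonical_target: str | None, maxfrag_target: str | None, candidates: list[dict]) -> dict[str, dict[int, int]]:
--     exact = {k: 0 for k in TOP_KS}
--     canonical = {k: 0 for k in TOP_KS}
--     maxfrag = {k: 0 for k in TOP_KS}
--     for k in TOP_KS:
--         top = order[:k]
--         texts = [candidates[idx]["text"] for idx in top]
--         canonical_texts = [candidates[idx]["canonical_text"] for idx in top]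
--         maxfrag_texts = [candidates[idx]["maxfrag_text"] for idx in top]
--         exact[k] = int(target_text in texts)
--         canonical[k] = int(canonical_target is not None and canonical_target in canonical_texts)
--         maxfrag[k] = int(maxfrag_target is not None and maxfrag_target in maxfrag_texts)
--     return {"exact": exact, "canonical": canonical, "maxfrag": maxfrag}
-- ===== SOURCE B (Python) =====
-- TOP_KS = (1, 3, 5, 10)
--
-- def hits_for_order(order: list[int], target_text: str, canonical_target: str | None, maxfrag_target: str | None, candidates: list[dict]) -> dict[str, dict[int, int]]:
--     prefix = [candidates[idx] for idx in order[:10]]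
--
--     def first_hit(key, target):
--         return next((i for i, c in enumerate(prefix) if target is not None and c[key] == target), None)
--
--     def row(first):
--         return {k: int(first is not None and first < k) for k in TOP_KS}
--
--     return {"exact": row(first_hit("text", target_text)),
--             "canonical": row(first_hit("canonical_text", canonical_target)),
--             "maxfrag": row(first_hit("maxfrag_text", maxfrag_target))}
-- ===== Notes on version B (the rewrite author's own statement) =====
-- stated objective: alternative
-- what changed: Instead of four overlapping prefix rescans (building three text lists per k and testing membership), B materialises the 10-candidate prefix once, finds the first matching position per category with a single scan, and derives each top-k indicator as first_pos < k.
import Mathlib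
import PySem

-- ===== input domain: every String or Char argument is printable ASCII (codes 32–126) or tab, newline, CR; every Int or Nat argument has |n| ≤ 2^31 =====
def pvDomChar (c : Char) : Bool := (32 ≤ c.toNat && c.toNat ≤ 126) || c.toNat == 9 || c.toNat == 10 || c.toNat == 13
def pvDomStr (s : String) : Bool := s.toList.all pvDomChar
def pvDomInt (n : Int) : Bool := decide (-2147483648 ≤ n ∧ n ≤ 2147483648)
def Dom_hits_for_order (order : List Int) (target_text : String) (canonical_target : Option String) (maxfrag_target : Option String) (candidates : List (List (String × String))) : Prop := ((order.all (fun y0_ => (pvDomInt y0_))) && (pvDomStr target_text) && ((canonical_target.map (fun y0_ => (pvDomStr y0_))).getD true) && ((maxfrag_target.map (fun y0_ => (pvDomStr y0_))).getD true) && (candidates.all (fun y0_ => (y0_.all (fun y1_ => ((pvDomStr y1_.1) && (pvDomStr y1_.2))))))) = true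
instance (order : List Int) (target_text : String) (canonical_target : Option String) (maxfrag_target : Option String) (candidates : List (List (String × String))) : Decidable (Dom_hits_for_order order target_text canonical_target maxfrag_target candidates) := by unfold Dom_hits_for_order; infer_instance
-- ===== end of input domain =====

-- B replaces A's four overlapping prefix rescans by one first-match index per category plus a first_pos < k test; alternative decomposition, same cost class.


-- ===== PORT A =====
-- TOP_KS = (1, 3, 5, 10)
def pvTopKs : List Int := [1, 3, 5, 10]

-- candidates[idx] ; the .getD [] default is unreachable under Pre_ (Python raises IndexError there)
def pvCand (candidates : List (List (String × String))) (idx : Int) : List (String × String) :=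
  (PySem.List.pyGet? candidates idx).getD []

-- c[key] ; the .getD "" default is unreachable under Pre_ (Python raises KeyError there)
def pvDGet (c : List (String × String)) (key : String) : String :=
  ((PySem.Dict.mk c).get? key).getD ""

-- exact[k] = v : overwrite of an existing key, in place
def pvSetK (d : List (Int × Int)) (k : Int) (v : Int) : List (Int × Int) :=
  d.map (fun p => if p.1 == k then (k, v) else p)

def hits_for_order (order : List Int) (target_text : String) (canonical_target : Option String) (maxfrag_target : Option String) (candidates : List (List (String × String))) : List (String × List (Int × Int)) :=
  let exact0 : List (Int × Int) := pvTopKs.map (fun k => (k, 0))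
  let canonical0 : List (Int × Int) := pvTopKs.map (fun k => (k, 0))
  let maxfrag0 : List (Int × Int) := pvTopKs.map (fun k => (k, 0))
  let st := pvTopKs.foldl
    (fun (st : List (Int × Int) × List (Int × Int) × List (Int × Int)) k =>
      let top := PySem.List.slice order none (some k)
      let texts := top.map (fun idx => pvDGet (pvCand candidates idx) "text")
      let canonical_texts := top.map (fun idx => pvDGet (pvCand candidates idx) "canonical_text")
      let maxfrag_texts := top.map (fun idx => pvDGet (pvCand candidates idx) "maxfrag_text")
      (pvSetK st.1 k (if target_text ∈ texts then 1 else 0),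
       pvSetK st.2.1 k (if (match canonical_target with | some t => decide (t ∈ canonical_texts) | none => false) = true then 1 else 0),
       pvSetK st.2.2 k (if (match maxfrag_target with | some t => decide (t ∈ maxfrag_texts) | none => false) = true then 1 else 0)))
    (exact0, canonical0, maxfrag0)
  [("exact", st.1), ("canonical", st.2.1), ("maxfrag", st.2.2)]

-- ===== PORT B =====
-- first_hit: index of the first prefix candidate whose key-value equals the (non-None) target
def pvFirstHit (pfx : List (List (String × String))) (key : String) (target : Option String) : Option Nat :=
  pfx.findIdx? (fun c => match target with | some t => pvDGet c key == t | none => false)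

-- row(first) = {k: int(first is not None and first < k) for k in TOP_KS}
def pvRow (first : Option Nat) : List (Int × Int) :=
  pvTopKs.map (fun k => (k, if (match first with | some i => decide ((i : Int) < k) | none => false) = true then 1 else 0))

def hits_for_order_alt (order : List Int) (target_text : String) (canonical_target : Option String) (maxfrag_target : Option String) (candidates : List (List (String × String))) : List (String × List (Int × Int)) :=
  let pfx := (PySem.List.slice order none (some 10)).map (fun idx => pvCand candidates idx)
  [("exact", pvRow (pvFirstHit pfx "text" (some target_text))),
   ("canonical", pvRow (pvFirstHit pfx "canonical_text" canonical_target)),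
   ("maxfrag", pvRow (pvFirstHit pfx "maxfrag_text" maxfrag_target))]

-- ===== PRECONDITION & SPEC =====
-- Pre_ excludes exactly the inputs where the Python A raises: some index in order[:10] is out of
-- range for candidates (IndexError) or an accessed candidate lacks one of the three keys (KeyError).
def Pre_hits_for_order (order : List Int) (target_text : String) (canonical_target : Option String) (maxfrag_target : Option String) (candidates : List (List (String × String))) : Prop :=
  ∀ idx ∈ order.take 10, PySem.Raise.InRange candidates.length idx ∧
    ∀ key ∈ (["text", "canonical_text", "maxfrag_text"] : List String),
      (PySem.Dict.mk ((PySem.List.pyGet? candidates idx).getD [])).contains key = true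
instance (order : List Int) (target_text : String) (canonical_target : Option String) (maxfrag_target : Option String) (candidates : List (List (String × String))) : Decidable (Pre_hits_for_order order target_text canonical_target maxfrag_target candidates) := by unfold Pre_hits_for_order; infer_instance

def pvWitness_hits_for_order : List Int × String × Option String × Option String × (List (List (String × String))) :=
  ([0], "a", none, none, [[("text", "a"), ("canonical_text", "b"), ("maxfrag_text", "c")]])

def Spec_hits_for_order (order : List Int) (target_text : String) (canonical_target : Option String) (maxfrag_target : Option String) (candidates : List (List (String × String))) (out : List (String × List (Int × Int))) : Prop := out = hits_for_order_alt order target_text canonical_target maxfrag_target candidates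
instance (order : List Int) (target_text : String) (canonical_target : Option String) (maxfrag_target : Option String) (candidates : List (List (String × String))) (out : List (String × List (Int × Int))) : Decidable (Spec_hits_for_order order target_text canonical_target maxfrag_target candidates out) := by unfold Spec_hits_for_order; infer_instance

-- ===== CLAIM (what is proved, stated in full; the proofs are below) =====
def Claim_equal_hits_for_order : Prop := ∀ (order : List Int) (target_text : String) (canonical_target : Option String) (maxfrag_target : Option String) (candidates : List (List (String × String))), Dom_hits_for_order order target_text canonical_target maxfrag_target candidates → Pre_hits_for_order order target_text canonical_target maxfrag_target candidates → Spec_hits_for_order order target_text canonical_target maxfrag_target candidates (hits_for_order order target_text canonical_target maxfrag_target candidates)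

-- ===== LEMMAS AND PROOFS =====

-- membership of t in the first j elements ↔ the first match over the whole list sits before j
lemma pv_core (L : List String) (t : String) (j : Nat) :
    (if t ∈ L.take j then (1 : Int) else 0)
      = (match L.findIdx? (fun s => s == t) with
         | some i => if (i : Int) < (j : Int) then (1 : Int) else 0
         | none => 0) := by
  induction L generalizing j with
  | nil => simp
  | cons a L ih =>
    rw [List.findIdx?_cons]
    by_cases hb : (a == t) = true
    · have ha : a = t := eq_of_beq hb
      subst ha
      cases j with
      | zero => simp
      | succ j => simp
    · have ha : ¬ t = a := fun h => hb (by simp [h])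
      cases j with
      | zero =>
        simp only [List.take_zero, List.mem_nil_iff, if_false, hb, Bool.false_eq_true]
        cases hL : L.findIdx? (fun s => s == t) with
        | none => simp
        | some i =>
          simp only [Option.map_some]
          rw [if_neg (by push_cast; omega)]
      | succ j =>
        have hIH := ih j
        simp only [List.take_succ_cons, List.mem_cons, ha, false_or, hb, Bool.false_eq_true, if_false]
        cases hL : L.findIdx? (fun s => s == t) with
        | none => simp only [hL] at hIH ⊢; simpa using hIH
        | some i =>
          simp only [hL, Option.map_some] at hIH ⊢
          rw [hIH]
          by_cases hij : ((i : Int) < (j : Int))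
          · rw [if_pos hij, if_pos (by push_cast at hij ⊢; omega)]
          · rw [if_neg hij, if_neg (by push_cast at hij ⊢; omega)]

-- row-building: B's 0/1 entry as a match on the first-hit index
lemma pv_row_eq (o : Option Nat) (k : Int) :
    (if (match o with | some i => decide ((i : Int) < k) | none => false) = true then (1 : Int) else 0)
      = (match o with | some i => if (i : Int) < k then (1 : Int) else 0 | none => 0) := by
  cases o <;> simp

-- the per-(category, k) indicator: A's membership test on order[:j] equals B's first-hit comparison
lemma pv_ind_some (order : List Int) (candidates : List (List (String × String)))
    (key : String) (s : String) (j : Nat) (k : Int) (hj : j ≤ 10) (hk : k = (j : Int)) :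
    (if s ∈ (order.take j).map (fun idx => pvDGet (pvCand candidates idx) key) then (1 : Int) else 0)
      = (if (match pvFirstHit ((order.take 10).map (fun idx => pvCand candidates idx)) key (some s) with
             | some i => decide ((i : Int) < k) | none => false) = true then (1 : Int) else 0) := by
  rw [pv_row_eq, hk]
  have hmap : pvFirstHit ((order.take 10).map (fun idx => pvCand candidates idx)) key (some s)
      = (((order.take 10).map (fun idx => pvCand candidates idx)).map (fun c => pvDGet c key)).findIdx? (fun x => x == s) := by
    unfold pvFirstHit
    rw [List.findIdx?_map, List.findIdx?_map, List.findIdx?_map]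
    rfl
  have htake : (order.take j).map (fun idx => pvDGet (pvCand candidates idx) key)
      = ((((order.take 10).map (fun idx => pvCand candidates idx)).map (fun c => pvDGet c key)).take j) := by
    rw [List.map_map, ← List.map_take, List.take_take, Nat.min_eq_left hj]
    rfl
  rw [hmap, htake]
  exact pv_core _ s j

-- the same with an optional target (canonical / maxfrag): a None target never matches
lemma pv_ind_opt (order : List Int) (candidates : List (List (String × String)))
    (key : String) (t : Option String) (j : Nat) (k : Int) (hj : j ≤ 10) (hk : k = (j : Int)) :
    (if (match t with
         | some s => decide (s ∈ (order.take j).map (fun idx => pvDGet (pvCand candidates idx) key))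
         | none => false) = true then (1 : Int) else 0)
      = (if (match pvFirstHit ((order.take 10).map (fun idx => pvCand candidates idx)) key t with
             | some i => decide ((i : Int) < k) | none => false) = true then (1 : Int) else 0) := by
  cases t with
  | none =>
    have hnone : pvFirstHit ((order.take 10).map (fun idx => pvCand candidates idx)) key none = none :=
      List.findIdx?_eq_none_iff.mpr (by intro x hx; rfl)
    rw [hnone]
  | some s =>
    have := pv_ind_some order candidates key s j k hj hk
    simpa using this

-- slice order[:k] for a nonneg numeral k is take
lemma pv_slice (order : List Int) (k : Nat) :
    PySem.List.slice order none (some (k : Int)) = order.take k :=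
  PySem.List.slice_to_natCast order k

-- ===== VERDICT (by name: the statement is the Claim_ definition above) =====
theorem hits_for_order_spec : Claim_equal_hits_for_order := by
  intro order target_text canonical_target maxfrag_target candidates _hdom _hpre
  unfold Spec_hits_for_order hits_for_order hits_for_order_alt
  have h1 := pv_slice order 1
  have h3 := pv_slice order 3
  have h5 := pv_slice order 5
  have h10 := pv_slice order 10
  norm_num at h1 h3 h5 h10
  simp only [pvTopKs, pvRow, List.foldl, List.map, h1, h3, h5, h10]
  rw [pv_ind_some order candidates "text" target_text 1 1 (by omega) (by norm_num),
      pv_ind_some order candidates "text" target_text 3 3 (by omega) (by norm_num),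
      pv_ind_some order candidates "text" target_text 5 5 (by omega) (by norm_num),
      pv_ind_some order candidates "text" target_text 10 10 (by omega) (by norm_num),
      pv_ind_opt order candidates "canonical_text" canonical_target 1 1 (by omega) (by norm_num),
      pv_ind_opt order candidates "canonical_text" canonical_target 3 3 (by omega) (by norm_num),
      pv_ind_opt order candidates "canonical_text" canonical_target 5 5 (by omega) (by norm_num),
      pv_ind_opt order candidates "canonical_text" canonical_target 10 10 (by omega) (by norm_num),
      pv_ind_opt order candidates "maxfrag_text" maxfrag_target 1 1 (by omega) (by norm_num),
      pv_ind_opt order candidates "maxfrag_text" maxfrag_target 3 3 (by omega) (by norm_num),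
      pv_ind_opt order candidates "maxfrag_text" maxfrag_target 5 5 (by omega) (by norm_num),
      pv_ind_opt order candidates "maxfrag_text" maxfrag_target 10 10 (by omega) (by norm_num)]
  simp [pvSetK]
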